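-- pv_equiv track=rewrite | github.com/StarfBerry/poke-scripts | RNG/Euclid.py | lcrng_recover_lower_16bits_pid
-- ===== SOURCE A (Python) =====
-- from math import ceil
--
-- LCRNG_MUL      = 0x41C64E6D       # LCRNG mul constant
--
-- LCRNG_SUB      = 0xFFFF6074       # (LCRNG add - 0xFFFF) & 0xFFFFFFFF
--
-- LCRNG_BASE     = 0x41C60CA7B192   # (LCRNG_MUL + 1) * 0xFFFF
--
-- LCRNG_PRIME    = 0x25
--
-- LCRNG_RMAX     = 0x250000
--
-- LCRNG_SKIP1    = 0x73E2B0
--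
-- def lcrng_recover_lower_16bits_pid(pid):
--     first = (pid & 0xffff) << 16
--     second = pid & 0xffff0000
--
--     k = 0
--     t = (second - LCRNG_MUL * first - LCRNG_SUB) & 0xffffffff
--     x = (t * LCRNG_PRIME) % LCRNG_MUL
--     kmax = (LCRNG_BASE - t) >> 32
--
--     res = []
--     while k <= kmax: # at most 117 iterations
--         r = (x + LCRNG_SKIP1 * k) % LCRNG_MUL
--         if r % LCRNG_PRIME == 0 and r < LCRNG_RMAX:
--             tmp = t + k * 0x100000000
--             res.append(first | (tmp // LCRNG_MUL))
--
--         k += ceil((LCRNG_MUL - r) / LCRNG_SKIP1)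
--
--     return res
-- ===== SOURCE B (Python) =====
-- LCRNG_MUL      = 0x41C64E6D
-- LCRNG_SUB      = 0xFFFF6074
-- LCRNG_BASE     = 0x41C60CA7B192
-- LCRNG_PRIME    = 0x25
-- LCRNG_RMAX     = 0x250000
-- LCRNG_SKIP1    = 0x73E2B0
--
-- def lcrng_recover_lower_16bits_pid(pid):
--     first = (pid & 0xffff) << 16
--     second = pid & 0xffff0000
--     t = (second - LCRNG_MUL * first - LCRNG_SUB) & 0xffffffff
--     x = (t * LCRNG_PRIME) % LCRNG_MUL
--     kmax = (LCRNG_BASE - t) >> 32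
--     res = []
--     for k in range(kmax + 1):
--         r = (x + LCRNG_SKIP1 * k) % LCRNG_MUL
--         if r % LCRNG_PRIME == 0 and r < LCRNG_RMAX:
--             res.append(first | ((t + k * 0x100000000) // LCRNG_MUL))
--     return res
-- ===== Notes on version B (the rewrite author's own statement) =====
-- stated objective: simpler
-- what changed: A's while loop with a computed ceil-division stride is replaced by a plain for-loop scanning every k up to kmax inclusive, relying on the fact that every k the stride skips has r >= LCRNG_RMAX and so fails the test anyway.
import Mathlib
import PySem

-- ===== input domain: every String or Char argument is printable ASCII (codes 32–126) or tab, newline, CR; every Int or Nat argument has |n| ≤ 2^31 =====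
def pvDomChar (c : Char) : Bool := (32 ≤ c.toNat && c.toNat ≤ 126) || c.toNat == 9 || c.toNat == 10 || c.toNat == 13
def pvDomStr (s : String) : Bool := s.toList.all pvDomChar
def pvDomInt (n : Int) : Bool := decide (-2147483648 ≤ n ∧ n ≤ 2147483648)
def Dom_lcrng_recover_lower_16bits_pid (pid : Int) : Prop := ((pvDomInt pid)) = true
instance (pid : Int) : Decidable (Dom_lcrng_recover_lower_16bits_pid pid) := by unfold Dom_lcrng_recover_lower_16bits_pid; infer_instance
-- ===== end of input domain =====

-- B replaces A's computed-stride while loop with a plain exhaustive scan of k = 0 .. kmax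
-- (objective: simpler); same setup, same result expression, same ascending order.

-- ===== PORT A =====
-- ceil((LCRNG_MUL - r) / LCRNG_SKIP1): math.ceil of a float division; exact here because the
-- numerator is < 2^31 and a correctly-rounded double quotient of such ints never crosses an
-- integer boundary, so it equals the exact ceiling -((-a) // b).
def pvCeilDiv (a b : Int) : Int := -(PySem.Int.floordiv (-a) b)

theorem pvStep_ge_one (r : Int) (hr : r < 1103515245) : 1 ≤ pvCeilDiv (1103515245 - r) 7594672 := by
  unfold pvCeilDiv
  have h : PySem.Int.floordiv (-(1103515245 - r)) 7594672 < 0 :=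
    (PySem.Int.floordiv_lt_iff_lt_mul (by omega)).2 (by omega)
  omega

-- the while loop of A (state: k, res); `& 0xffffffff` etc. are ported with PySem.Int.band/bor
def pvLoopA (first t x kmax k : Int) (res : List Int) : List Int :=
  if _hk : k ≤ kmax then
    let r := PySem.Int.mod (x + 7594672 * k) 1103515245
    let res' := if PySem.Int.mod r 37 = 0 ∧ r < 2424832 then
        res ++ [PySem.Int.bor first (PySem.Int.floordiv (t + k * 4294967296) 1103515245)]
      else res
    pvLoopA first t x kmax (k + pvCeilDiv (1103515245 - r) 7594672) res'
  else res
termination_by (kmax + 1 - k).toNat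
decreasing_by
  have hr : PySem.Int.mod (x + 7594672 * k) 1103515245 < 1103515245 :=
    PySem.Int.mod_lt _ (by norm_num)
  have := pvStep_ge_one (PySem.Int.mod (x + 7594672 * k) 1103515245) hr
  omega

def lcrng_recover_lower_16bits_pid (pid : Int) : List Int :=
  let first := (PySem.Int.band pid 65535) <<< 16
  let second := PySem.Int.band pid 4294901760
  let t := PySem.Int.band (second - 1103515245 * first - 4294926452) 4294967295
  let x := PySem.Int.mod (t * 37) 1103515245
  let kmax := (72318871646610 - t) >>> 32
  pvLoopA first t x kmax 0 []

-- ===== PORT B =====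
def lcrng_recover_lower_16bits_pid_alt (pid : Int) : List Int :=
  let first := (PySem.Int.band pid 65535) <<< 16
  let second := PySem.Int.band pid 4294901760
  let t := PySem.Int.band (second - 1103515245 * first - 4294926452) 4294967295
  let x := PySem.Int.mod (t * 37) 1103515245
  let kmax := (72318871646610 - t) >>> 32
  (PySem.List.pyRange 0 (kmax + 1) 1).foldl (fun res k =>
    let r := PySem.Int.mod (x + 7594672 * k) 1103515245
    if PySem.Int.mod r 37 = 0 ∧ r < 2424832 then
      res ++ [PySem.Int.bor first (PySem.Int.floordiv (t + k * 4294967296) 1103515245)]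
    else res) []

-- ===== PRECONDITION & SPEC =====
def Spec_lcrng_recover_lower_16bits_pid (pid : Int) (out : List Int) : Prop := out = lcrng_recover_lower_16bits_pid_alt pid
instance (pid : Int) (out : List Int) : Decidable (Spec_lcrng_recover_lower_16bits_pid pid out) := by unfold Spec_lcrng_recover_lower_16bits_pid; infer_instance

-- ===== CLAIM (what is proved, stated in full; the proofs are below) =====
def Claim_equal_lcrng_recover_lower_16bits_pid : Prop := ∀ (pid : Int), Dom_lcrng_recover_lower_16bits_pid pid → Spec_lcrng_recover_lower_16bits_pid pid (lcrng_recover_lower_16bits_pid pid)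

-- ===== LEMMAS AND PROOFS =====

-- the step-1 scan both sides reduce to
def pvScan (first t x kmax k : Int) : List Int :=
  if _hk : k ≤ kmax then
    (if PySem.Int.mod (PySem.Int.mod (x + 7594672 * k) 1103515245) 37 = 0 ∧
        PySem.Int.mod (x + 7594672 * k) 1103515245 < 2424832 then
       [PySem.Int.bor first (PySem.Int.floordiv (t + k * 4294967296) 1103515245)]
     else []) ++ pvScan first t x kmax (k + 1)
  else []
termination_by (kmax + 1 - k).toNat
decreasing_by omega

theorem pvScan_nil (first t x kmax k : Int) (h : kmax < k) : pvScan first t x kmax k = [] := by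
  unfold pvScan; simp [show ¬ k ≤ kmax by omega]

-- a stretch of k's on which the test fails contributes nothing
theorem pvScan_skip (first t x kmax : Int) :
    ∀ (n : Nat) (k k' : Int), k' - k = n →
    (∀ j, k ≤ j → j < k' → ¬ (PySem.Int.mod (PySem.Int.mod (x + 7594672 * j) 1103515245) 37 = 0 ∧
        PySem.Int.mod (x + 7594672 * j) 1103515245 < 2424832)) →
    pvScan first t x kmax k = pvScan first t x kmax k' := by
  intro n
  induction n with
  | zero => intro k k' h _; exact congrArg (pvScan first t x kmax) (by omega)
  | succ m ih =>
    intro k k' h hfail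
    have hkk : k < k' := by omega
    by_cases hk : k ≤ kmax
    · rw [pvScan]
      simp only [hk, dif_pos]
      rw [if_neg (hfail k le_rfl hkk)]
      simp only [List.nil_append]
      exact ih (k + 1) k' (by omega) (fun j h1 h2 => hfail j (by omega) h2)
    · rw [pvScan_nil _ _ _ _ _ (by omega), pvScan_nil _ _ _ _ _ (by omega)]

-- every k strictly between a stride step fails the test: its r is r + SKIP1*(j-k) ≥ SKIP1 > RMAX
theorem pvSkipped_fail (x k j : Int) (hj : k < j)
    (hs : j < k + pvCeilDiv (1103515245 - PySem.Int.mod (x + 7594672 * k) 1103515245) 7594672) :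
    ¬ (PySem.Int.mod (PySem.Int.mod (x + 7594672 * j) 1103515245) 37 = 0 ∧
        PySem.Int.mod (x + 7594672 * j) 1103515245 < 2424832) := by
  intro hcond
  set r := PySem.Int.mod (x + 7594672 * k) 1103515245 with hrdef
  have hr0 : 0 ≤ r := PySem.Int.mod_nonneg _ (by norm_num)
  have hr1 : r < 1103515245 := PySem.Int.mod_lt _ (by norm_num)
  set s := pvCeilDiv (1103515245 - r) 7594672 with hsdef
  -- ceiling bracket: (s-1)*SKIP1 < MUL - r ≤ s*SKIP1
  have hbr : (s - 1) * 7594672 < 1103515245 - r ∧ 1103515245 - r ≤ s * 7594672 :=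
    (PySem.Int.neg_floordiv_neg_eq_iff_of_pos (by norm_num)).1 rfl
  have hd : 1 ≤ j - k ∧ j - k ≤ s - 1 := by omega
  have hlt : r + 7594672 * (j - k) < 1103515245 := by nlinarith [hbr.1, hd.1, hd.2]
  -- r at j equals r + SKIP1*(j-k)
  have hq := PySem.Int.floordiv_mul_add_mod (x + 7594672 * k) 1103515245
  have hrj : PySem.Int.mod (x + 7594672 * j) 1103515245 = r + 7594672 * (j - k) := by
    rw [PySem.Int.mod_eq_emod_of_pos (by norm_num)]
    have hx : x + 7594672 * j =
        (PySem.Int.floordiv (x + 7594672 * k) 1103515245) * 1103515245 + (r + 7594672 * (j - k)) := by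
      rw [hrdef]; nlinarith [hq]
    rw [hx]
    omega
  have : 7594672 ≤ r + 7594672 * (j - k) := by nlinarith [hd.1, hr0]
  rw [hrj] at hcond
  omega

-- A's strided loop computes the step-1 scan
theorem pvLoopA_eq_scan (first t x kmax : Int) :
    ∀ (n : Nat) (k : Int) (res : List Int), (kmax + 1 - k).toNat = n →
    pvLoopA first t x kmax k res = res ++ pvScan first t x kmax k := by
  intro n
  induction n using Nat.strong_induction_on with
  | _ n ih =>
    intro k res hn
    by_cases hk : k ≤ kmax
    · have hr1 : PySem.Int.mod (x + 7594672 * k) 1103515245 < 1103515245 :=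
        PySem.Int.mod_lt _ (by norm_num)
      have hstep := pvStep_ge_one _ hr1
      rw [pvLoopA]
      simp only [hk, dif_pos]
      rw [ih (kmax + 1 - (k + pvCeilDiv (1103515245 - PySem.Int.mod (x + 7594672 * k) 1103515245) 7594672)).toNat
            (by omega) _ _ rfl]
      conv_rhs => rw [pvScan]
      simp only [hk, dif_pos]
      rw [pvScan_skip first t x kmax
            (pvCeilDiv (1103515245 - PySem.Int.mod (x + 7594672 * k) 1103515245) 7594672 - 1).toNat
            (k + 1) (k + pvCeilDiv (1103515245 - PySem.Int.mod (x + 7594672 * k) 1103515245) 7594672)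
            (by omega)
            (fun j h1 h2 => pvSkipped_fail x k j (by omega) h2)]
      split_ifs with hc <;> simp
    · rw [pvLoopA, pvScan_nil _ _ _ _ _ (by omega)]
      simp [hk]

-- B's range fold computes the step-1 scan
theorem pvFoldB_eq_scan (first t x kmax : Int) :
    ∀ (n : Nat) (k : Int) (res : List Int), (kmax + 1 - k).toNat = n →
    (PySem.List.pyRange k (kmax + 1) 1).foldl (fun res k =>
        let r := PySem.Int.mod (x + 7594672 * k) 1103515245
        if PySem.Int.mod r 37 = 0 ∧ r < 2424832 then
          res ++ [PySem.Int.bor first (PySem.Int.floordiv (t + k * 4294967296) 1103515245)]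
        else res) res = res ++ pvScan first t x kmax k := by
  intro n
  induction n with
  | zero =>
    intro k res hn
    rw [PySem.List.pyRange_one_eq_nil (by omega), pvScan_nil _ _ _ _ _ (by omega)]
    simp
  | succ m ih =>
    intro k res hn
    have hk : k ≤ kmax := by omega
    rw [PySem.List.pyRange_one_cons (by omega), List.foldl_cons, ih (k + 1) _ (by omega)]
    conv_rhs => rw [pvScan]
    simp only [hk, dif_pos]
    split_ifs with hc <;> simp

-- ===== VERDICT (by name: the statement is the Claim_ definition above) =====
theorem lcrng_recover_lower_16bits_pid_spec : Claim_equal_lcrng_recover_lower_16bits_pid := by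
  intro pid _
  unfold Spec_lcrng_recover_lower_16bits_pid
  unfold lcrng_recover_lower_16bits_pid lcrng_recover_lower_16bits_pid_alt
  rw [pvLoopA_eq_scan _ _ _ _ _ 0 [] rfl, pvFoldB_eq_scan _ _ _ _ _ 0 [] rfl]
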